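-- pv_equiv track=rewrite | github.com/bfsujason/mac | mark_disagreement.py | find_diff
-- ===== SOURCE A (Python) =====
-- def find_diff(alignments_1, alignments_2):
--     idxs = []
--     anno_1 = set([(tuple(x), tuple(y)) for x, y in alignments_1])
--     anno_2 = set([(tuple(x), tuple(y)) for x, y in alignments_2])
--     diff = list(anno_1 - anno_2)
--     diff = [(list(x), list(y)) for x, y in diff]
--     idxs = find_idxs(diff, alignments_1)
--     return idxs
--
-- def find_idxs(links, alignments):
--     idxs = []
--     for link in links:
--         idx = alignments.index(link)
--         idxs.append(idx)
--     return sorted(idxs)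
-- ===== SOURCE B (Python) =====
-- def find_diff(alignments_1, alignments_2):
--     anno_2 = set((tuple(x), tuple(y)) for x, y in alignments_2)
--     seen = set()
--     idxs = []
--     for i, (x, y) in enumerate(alignments_1):
--         key = (tuple(x), tuple(y))
--         if key not in anno_2 and key not in seen:
--             idxs.append(i)
--             seen.add(key)
--     return idxs
-- ===== Notes on version B (the rewrite author's own statement) =====
-- stated objective: simpler
-- what changed: Replaces set-difference followed by a reverse .index lookup per link and a final sort with a single forward pass over enumerate(alignments_1) that emits first-occurrence indices (tracked by a seen set) directly in ascending order, so the sort and all .index scans disappear.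
import Mathlib
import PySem

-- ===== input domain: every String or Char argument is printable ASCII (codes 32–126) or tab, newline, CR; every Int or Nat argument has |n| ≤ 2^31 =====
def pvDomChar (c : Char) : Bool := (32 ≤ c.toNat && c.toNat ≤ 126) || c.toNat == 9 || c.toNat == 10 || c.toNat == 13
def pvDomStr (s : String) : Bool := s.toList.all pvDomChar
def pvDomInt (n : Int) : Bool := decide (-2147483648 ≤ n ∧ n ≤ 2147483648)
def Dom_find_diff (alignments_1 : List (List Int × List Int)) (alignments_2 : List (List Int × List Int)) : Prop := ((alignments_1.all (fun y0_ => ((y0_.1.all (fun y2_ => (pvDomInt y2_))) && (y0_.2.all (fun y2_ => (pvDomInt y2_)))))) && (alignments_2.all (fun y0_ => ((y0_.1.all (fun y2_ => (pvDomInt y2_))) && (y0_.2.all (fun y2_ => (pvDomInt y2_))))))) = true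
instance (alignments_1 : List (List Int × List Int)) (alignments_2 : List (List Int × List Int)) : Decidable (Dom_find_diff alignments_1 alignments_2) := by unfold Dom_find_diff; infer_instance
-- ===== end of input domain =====

-- ===== PORT A =====
-- B replaces A's set-difference + per-link reverse .index lookups + final sort by one forward
-- pass over enumerate(alignments_1) with a seen-set, emitting indices already in ascending order.
-- Note: Python's (tuple(x), tuple(y)) keys are identity conversions under the type convention;
-- list(anno_1 - anno_2) is iterated in Python's hash order, but the final sorted(idxs) makes the
-- result order-independent, so PySem.Set's insertion order is faithful for the returned value.
-- alignments.index(link) never raises here (every link of diff occurs in alignments_1), so the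
-- port reads the always-some PySem.List.index? with getD 0.
def find_idxs (links : List (List Int × List Int)) (alignments : List (List Int × List Int)) : List Int :=
  let idxs := links.foldl (fun acc link => acc ++ [(((PySem.List.index? alignments link).getD 0 : Nat) : Int)]) []
  PySem.List.sorted idxs (fun x => x) false

def find_diff (alignments_1 : List (List Int × List Int)) (alignments_2 : List (List Int × List Int)) : List Int :=
  let anno_1 : PySem.Set (List Int × List Int) := PySem.Set.ofList alignments_1
  let anno_2 : PySem.Set (List Int × List Int) := PySem.Set.ofList alignments_2
  let diff : List (List Int × List Int) := PySem.Set.diff anno_1 anno_2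
  find_idxs diff alignments_1

-- ===== PORT B =====
def find_diff_alt (alignments_1 : List (List Int × List Int)) (alignments_2 : List (List Int × List Int)) : List Int :=
  let anno_2 : PySem.Set (List Int × List Int) := PySem.Set.ofList alignments_2
  let st := (PySem.List.enumerate alignments_1).foldl
    (fun (st : PySem.Set (List Int × List Int) × List Int) p =>
      if !(PySem.Set.contains anno_2 p.2) && !(PySem.Set.contains st.1 p.2)
      then (PySem.Set.add st.1 p.2, st.2 ++ [p.1])
      else st)
    (PySem.Set.empty, [])
  st.2

-- ===== PRECONDITION & SPEC =====
def Spec_find_diff (alignments_1 : List (List Int × List Int)) (alignments_2 : List (List Int × List Int)) (out : List Int) : Prop := out = find_diff_alt alignments_1 alignments_2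
instance (alignments_1 : List (List Int × List Int)) (alignments_2 : List (List Int × List Int)) (out : List Int) : Decidable (Spec_find_diff alignments_1 alignments_2 out) := by unfold Spec_find_diff; infer_instance

-- ===== CLAIM (what is proved, stated in full; the proofs are below) =====
def Claim_equal_find_diff : Prop := ∀ (alignments_1 : List (List Int × List Int)) (alignments_2 : List (List Int × List Int)), Dom_find_diff alignments_1 alignments_2 → Spec_find_diff alignments_1 alignments_2 (find_diff alignments_1 alignments_2)

-- ===== LEMMAS AND PROOFS =====

-- first index of v in a1 (as a Nat; 0 default is never read for v ∈ a1)
def pvIdx {A : Type} [BEq A] (a1 : List A) (v : A) : Nat :=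
  (PySem.List.index? a1 v).getD 0

theorem pvIdx_lt_length {A : Type} [BEq A] [LawfulBEq A] (a1 : List A) (v : A)
    (h : v ∈ a1) : pvIdx a1 v < a1.length := by
  obtain ⟨k, hk⟩ := Option.isSome_iff_exists.mp ((PySem.List.index?_isSome_iff a1 v).mpr h)
  obtain ⟨hlt, -, -⟩ := PySem.List.getElem_of_index?_eq_some hk
  simp only [pvIdx, hk, Option.getD_some]
  exact hlt

theorem pvIdx_append {A : Type} [BEq A] [LawfulBEq A] (a1 t : List A) (v : A)
    (h : v ∈ a1) : pvIdx (a1 ++ t) v = pvIdx a1 v := by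
  unfold pvIdx
  rw [PySem.List.index?_append_of_mem t h]

theorem pvIdx_append_self {A : Type} [BEq A] [LawfulBEq A] (a1 : List A) (v : A)
    (h : v ∉ a1) : pvIdx (a1 ++ [v]) v = a1.length := by
  unfold pvIdx
  rw [PySem.List.index?_append_singleton_self a1 v h]
  rfl

-- first indices of the distinct elements of a1, in first-occurrence order, are strictly increasing
theorem pvIdx_pairwise {A : Type} [BEq A] [LawfulBEq A] (a1 : List A) :
    (PySem.Set.ofList a1).Pairwise (fun u v => pvIdx a1 u < pvIdx a1 v) := by
  induction a1 using List.reverseRecOn with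
  | nil => simp [PySem.Set.ofList]
  | append_singleton a1 x ih =>
    rw [PySem.Set.ofList_append_singleton]
    by_cases hx : x ∈ a1
    · rw [PySem.Set.add_of_mem ((PySem.Set.mem_ofList a1 x).mpr hx)]
      refine ih.imp_of_mem (fun hu hv h => ?_)
      have hu' := (PySem.Set.mem_ofList a1 _).mp hu
      have hv' := (PySem.Set.mem_ofList a1 _).mp hv
      rwa [pvIdx_append a1 [x] _ hu', pvIdx_append a1 [x] _ hv']
    · rw [PySem.Set.add_of_not_mem (fun h => hx ((PySem.Set.mem_ofList a1 x).mp h))]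
      rw [List.pairwise_append]
      refine ⟨ih.imp_of_mem (fun hu hv h => ?_), by simp, fun u hu v hv => ?_⟩
      · have hu' := (PySem.Set.mem_ofList a1 _).mp hu
        have hv' := (PySem.Set.mem_ofList a1 _).mp hv
        rwa [pvIdx_append a1 [x] _ hu', pvIdx_append a1 [x] _ hv']
      · have hu' := (PySem.Set.mem_ofList a1 _).mp hu
        rcases List.mem_singleton.mp hv with rfl
        rw [pvIdx_append a1 [v] _ hu', pvIdx_append_self a1 v hx]
        exact pvIdx_lt_length a1 u hu'

-- the loop invariant of B: after scanning a1, seen = set(a1) - anno_2 (first-occurrence order)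
-- and the accumulator holds the first indices of its elements, in that order
theorem pvB_inv {A : Type} [BEq A] [LawfulBEq A] (anno_2 : PySem.Set A) (a1 : List A) :
    (PySem.List.enumerate a1).foldl
      (fun (st : PySem.Set A × List Int) p =>
        if !(PySem.Set.contains anno_2 p.2) && !(PySem.Set.contains st.1 p.2)
        then (PySem.Set.add st.1 p.2, st.2 ++ [p.1])
        else st)
      (PySem.Set.empty, []) =
    (PySem.Set.diff (PySem.Set.ofList a1) anno_2,
     (PySem.Set.diff (PySem.Set.ofList a1) anno_2).map (fun v => ((pvIdx a1 v : Nat) : Int))) := by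
  induction a1 using List.reverseRecOn with
  | nil => rfl
  | append_singleton a1 x ih =>
    rw [PySem.List.enumerate_append, List.foldl_append, ih]
    have hmap : ∀ t : List A,
        (PySem.Set.diff (PySem.Set.ofList a1) anno_2).map (fun v => ((pvIdx (a1 ++ t) v : Nat) : Int)) =
        (PySem.Set.diff (PySem.Set.ofList a1) anno_2).map (fun v => ((pvIdx a1 v : Nat) : Int)) := by
      intro t
      refine List.map_congr_left (fun v hva => ?_)
      have hv1 : v ∈ a1 := (PySem.Set.mem_ofList a1 v).mp ((PySem.Set.mem_diff _ _ _).mp hva).1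
      rw [pvIdx_append a1 t v hv1]
    have hofl := PySem.Set.ofList_append_singleton a1 x
    by_cases h2 : x ∈ anno_2
    · have hdiff : PySem.Set.diff (PySem.Set.ofList (a1 ++ [x])) anno_2 =
          PySem.Set.diff (PySem.Set.ofList a1) anno_2 := by
        rw [hofl]
        by_cases hx : x ∈ a1
        · rw [PySem.Set.add_of_mem ((PySem.Set.mem_ofList a1 x).mpr hx)]
        · rw [PySem.Set.add_of_not_mem (fun h => hx ((PySem.Set.mem_ofList a1 x).mp h))]
          simp [PySem.Set.diff, h2]
      simp [PySem.List.enumerate, h2, hdiff, hmap]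
    · by_cases hx : x ∈ a1
      · have hin : x ∈ PySem.Set.diff (PySem.Set.ofList a1) anno_2 :=
          (PySem.Set.mem_diff _ _ _).mpr ⟨(PySem.Set.mem_ofList a1 x).mpr hx, h2⟩
        have hdiff : PySem.Set.diff (PySem.Set.ofList (a1 ++ [x])) anno_2 =
            PySem.Set.diff (PySem.Set.ofList a1) anno_2 := by
          rw [hofl, PySem.Set.add_of_mem ((PySem.Set.mem_ofList a1 x).mpr hx)]
        simp [PySem.List.enumerate, h2, hin, hdiff, hmap]
      · have hxnotin : x ∉ PySem.Set.diff (PySem.Set.ofList a1) anno_2 := by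
          intro h
          exact hx ((PySem.Set.mem_ofList a1 x).mp ((PySem.Set.mem_diff _ _ _).mp h).1)
        have hdiff : PySem.Set.diff (PySem.Set.ofList (a1 ++ [x])) anno_2 =
            PySem.Set.diff (PySem.Set.ofList a1) anno_2 ++ [x] := by
          rw [hofl, PySem.Set.add_of_not_mem (fun h => hx ((PySem.Set.mem_ofList a1 x).mp h))]
          simp [PySem.Set.diff, h2]
        rw [hdiff]
        simp [PySem.List.enumerate, h2, hxnotin, hmap, pvIdx_append_self a1 x hx]

-- A's result: sorting the (already strictly increasing) first indices is the identity
theorem pvA_eq (a1 a2 : List (List Int × List Int)) :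
    find_diff a1 a2 =
    (PySem.Set.diff (PySem.Set.ofList a1) (PySem.Set.ofList a2)).map
      (fun v => ((pvIdx a1 v : Nat) : Int)) := by
  have hpw : (PySem.Set.diff (PySem.Set.ofList a1) (PySem.Set.ofList a2)).Pairwise
      (fun u v => pvIdx a1 u < pvIdx a1 v) :=
    (pvIdx_pairwise a1).sublist List.filter_sublist
  simp only [find_diff, find_idxs]
  rw [PySem.List.foldl_append_singleton_eq_map]
  simp only [List.nil_append]
  have hpw' : (List.map (fun link => (((PySem.List.index? a1 link).getD 0 : Nat) : Int))
      (PySem.Set.diff (PySem.Set.ofList a1) (PySem.Set.ofList a2))).Pairwise (fun a b => a ≤ b) := by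
    rw [List.pairwise_map]
    exact hpw.imp (fun h => Int.ofNat_le.mpr (Nat.le_of_lt h))
  rw [PySem.List.sorted_eq_self_of_pairwise _ _ hpw']
  rfl

-- ===== VERDICT (by name: the statement is the Claim_ definition above) =====
theorem find_diff_spec : Claim_equal_find_diff := by
  intro a1 a2 _
  unfold Spec_find_diff
  simp only [find_diff_alt]
  rw [pvB_inv, pvA_eq]
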